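-- pv_equiv track=rewrite | github.com/softkleenex/lgcpc-2025 | 2/solution_correct_v2.py | calc_contribution
-- ===== SOURCE A (Python) =====
-- MOD = 1000000007
--
-- def calc_contribution(digit, pos, n, k, tight, n_str):
--     """현재 digit이 최종 합에 기여하는 값 정확히 계산"""
--
--     # 이 digit 뒤에 오는 자릿수들에서 k가 제거된 후의 길이 분포 계산
--     remaining_pos = n - pos - 1
--
--     if remaining_pos == 0:
--         return digit
--
--     # 뒤쪽 자릿수들에서 만들어지는 모든 조합에 대해
--     # 이 digit이 최종 결과에서 차지하는 위치의 기댓값 계산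
--
--     total_contribution = 0
--
--     # 각 가능한 k 제거 개수에 대해 계산
--     for k_removed in range(remaining_pos + 1):
--         prob = probability_of_k_removed(remaining_pos, k, k_removed, tight, n_str[pos+1:] if pos+1 < n else "")
--         if prob > 0:
--             final_pos = remaining_pos - k_removed
--             digit_value = digit * pow(10, final_pos, MOD) % MOD
--             total_contribution = (total_contribution + digit_value * prob) % MOD
--
--     return total_contribution
--
-- def probability_of_k_removed(length, k, k_count, tight, limit_str):
--     """길이 length에서 정확히 k_count개의 k가 나올 확률 계산 (경우의 수로 계산)"""
--     if length == 0:
--         return 1 if k_count == 0 else 0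
--
--     # Dynamic programming to count exact ways
--     # This is complex for tight constraint, so use approximation
--
--     if k_count > length:
--         return 0
--
--     # 이항계수와 확률을 이용한 근사
--     from math import comb
--     if not tight:
--         # 각 자리에서 k가 나올 확률 1/10, 아닐 확률 9/10
--         ways = comb(length, k_count) * pow(9, length - k_count, MOD) % MOD
--         return ways
--     else:
--         # tight constraint가 있는 경우 복잡하므로 단순화
--         return count_exact_k(length, k, k_count, limit_str)
--
-- def count_exact_k(length, k, k_count, limit_str):
--     """정확히 k_count개의 k를 포함하는 경우의 수"""
--     if length == 0:
--         return 1 if k_count == 0 else 0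
--
--     # 간단한 근사: tight constraint 무시하고 계산
--     from math import comb
--     if k_count > length:
--         return 0
--
--     return comb(length, k_count) * pow(9, length - k_count, MOD) % MOD
-- ===== SOURCE B (Python) =====
-- MOD = 1000000007
--
-- def calc_contribution(digit, pos, n, k, tight, n_str):
--     """Closed form: sum_j C(L,j)*9^(L-j)*10^(L-j) = (9*10+1)^L = 91^L (binomial theorem)."""
--     remaining_pos = n - pos - 1
--     if remaining_pos == 0:
--         return digit
--     if remaining_pos < 0:
--         return 0
--     return digit * pow(91, remaining_pos, MOD) % MOD
-- ===== Notes on version B (the rewrite author's own statement) =====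
-- stated objective: simpler
-- what changed: Replaced the loop over removal counts (exact binomial coefficients combined term by term) by the binomial-theorem closed form digit * 91^L mod MOD, a single modular exponentiation.
import Mathlib
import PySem

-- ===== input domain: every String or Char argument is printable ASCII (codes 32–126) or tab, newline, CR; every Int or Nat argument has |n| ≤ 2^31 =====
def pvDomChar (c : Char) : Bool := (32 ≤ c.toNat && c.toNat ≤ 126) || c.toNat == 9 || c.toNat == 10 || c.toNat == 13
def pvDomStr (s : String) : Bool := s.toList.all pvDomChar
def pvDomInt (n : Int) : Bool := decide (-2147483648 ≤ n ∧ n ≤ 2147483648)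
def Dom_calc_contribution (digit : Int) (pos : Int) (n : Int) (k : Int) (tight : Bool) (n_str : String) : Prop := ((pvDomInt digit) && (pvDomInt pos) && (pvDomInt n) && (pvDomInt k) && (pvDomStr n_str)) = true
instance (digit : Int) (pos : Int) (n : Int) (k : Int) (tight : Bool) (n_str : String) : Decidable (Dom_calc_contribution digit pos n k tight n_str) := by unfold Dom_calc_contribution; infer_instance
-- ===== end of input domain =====

-- B replaces A's loop over removal counts by the binomial-theorem closed form digit * 91^L % MOD.

-- ===== PORT A =====
def pvMOD : Int := 1000000007

-- math.comb(length, k_count) is ported as Nat.choose on .toNat: exact here because every call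
-- reaching it has 0 ≤ k_count ≤ length; pow(b, e, MOD) is PySem.Int.powMod (e ≥ 0 at every call).
def count_exact_k (length : Int) (k : Int) (k_count : Int) (limit_str : String) : Int :=
  if length = 0 then (if k_count = 0 then 1 else 0)
  else if k_count > length then 0
  else PySem.Int.mod ((length.toNat.choose k_count.toNat : Int) * PySem.Int.powMod 9 (length - k_count).toNat pvMOD) pvMOD

def probability_of_k_removed (length : Int) (k : Int) (k_count : Int) (tight : Bool) (limit_str : String) : Int :=
  if length = 0 then (if k_count = 0 then 1 else 0)
  else if k_count > length then 0
  else if !tight then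
    PySem.Int.mod ((length.toNat.choose k_count.toNat : Int) * PySem.Int.powMod 9 (length - k_count).toNat pvMOD) pvMOD
  else count_exact_k length k k_count limit_str

def calc_contribution (digit : Int) (pos : Int) (n : Int) (k : Int) (tight : Bool) (n_str : String) : Int :=
  let remaining_pos := n - pos - 1
  if remaining_pos = 0 then digit
  else
    (PySem.List.pyRange 0 (remaining_pos + 1) 1).foldl (fun total_contribution k_removed =>
      let prob := probability_of_k_removed remaining_pos k k_removed tight
        (if pos + 1 < n then PySem.Str.slice n_str (some (pos + 1)) none else "")
      if prob > 0 then
        let final_pos := remaining_pos - k_removed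
        let digit_value := PySem.Int.mod (digit * PySem.Int.powMod 10 final_pos.toNat pvMOD) pvMOD
        PySem.Int.mod (total_contribution + digit_value * prob) pvMOD
      else total_contribution) 0

-- ===== PORT B =====
def calc_contribution_alt (digit : Int) (pos : Int) (n : Int) (k : Int) (tight : Bool) (n_str : String) : Int :=
  let remaining_pos := n - pos - 1
  if remaining_pos = 0 then digit
  else if remaining_pos < 0 then 0
  else PySem.Int.mod (digit * PySem.Int.powMod 91 remaining_pos.toNat pvMOD) pvMOD

-- ===== PRECONDITION & SPEC =====
def Spec_calc_contribution (digit : Int) (pos : Int) (n : Int) (k : Int) (tight : Bool) (n_str : String) (out : Int) : Prop := out = calc_contribution_alt digit pos n k tight n_str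
instance (digit : Int) (pos : Int) (n : Int) (k : Int) (tight : Bool) (n_str : String) (out : Int) : Decidable (Spec_calc_contribution digit pos n k tight n_str out) := by unfold Spec_calc_contribution; infer_instance

-- ===== CLAIM (what is proved, stated in full; the proofs are below) =====
def Claim_equal_calc_contribution : Prop := ∀ (digit : Int) (pos : Int) (n : Int) (k : Int) (tight : Bool) (n_str : String), Dom_calc_contribution digit pos n k tight n_str → Spec_calc_contribution digit pos n k tight n_str (calc_contribution digit pos n k tight n_str)

-- ===== LEMMAS AND PROOFS =====

theorem pvMOD_pos : (0 : Int) < pvMOD := by decide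

-- casting a Python mod by pvMOD into ZMod 1000000007 is the identity
theorem pv_cast_mod (a : Int) :
    ((PySem.Int.mod a pvMOD : Int) : ZMod 1000000007) = (a : ZMod 1000000007) := by
  rw [PySem.Int.mod_eq_emod_of_pos pvMOD_pos]
  have h : pvMOD = ((1000000007 : Nat) : Int) := by decide
  rw [h, ZMod.intCast_mod]

theorem pv_cast_powMod (b : Int) (e : Nat) :
    ((PySem.Int.powMod b e pvMOD : Int) : ZMod 1000000007) = (b : ZMod 1000000007) ^ e := by
  rw [PySem.Int.powMod_eq, pv_cast_mod]; push_cast; ring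

-- injectivity of the cast on [0, pvMOD)
theorem pv_cast_inj {a b : Int} (ha0 : 0 ≤ a) (ha1 : a < pvMOD) (hb0 : 0 ≤ b) (hb1 : b < pvMOD)
    (h : (a : ZMod 1000000007) = (b : ZMod 1000000007)) : a = b := by
  have hmod : a % ((1000000007 : Nat) : Int) = b % ((1000000007 : Nat) : Int) :=
    (ZMod.intCast_eq_intCast_iff a b 1000000007).mp h
  have hM : ((1000000007 : Nat) : Int) = pvMOD := by decide
  rw [hM, Int.emod_eq_of_lt ha0 ha1, Int.emod_eq_of_lt hb0 hb1] at hmod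
  exact hmod

-- on the indices A's loop actually passes (1 ≤ L, j ≤ L), prob is the same expression in both tight branches
theorem pv_prob_eq (L kk j : Int) (tight : Bool) (s : String) (hL : 1 ≤ L) (hj : j ≤ L) :
    probability_of_k_removed L kk j tight s =
      PySem.Int.mod ((L.toNat.choose j.toNat : Int) * PySem.Int.powMod 9 (L - j).toNat pvMOD) pvMOD := by
  unfold probability_of_k_removed count_exact_k
  have h0 : ¬ L = 0 := by omega
  have h1 : ¬ j > L := by omega
  cases tight <;> simp [h0, h1]

-- A's loop body, abstracted over the fixed data
def pvStep (digit L kk : Int) (tight : Bool) (s : String) (total j : Int) : Int :=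
  if probability_of_k_removed L kk j tight s > 0 then
    PySem.Int.mod (total + PySem.Int.mod (digit * PySem.Int.powMod 10 (L - j).toNat pvMOD) pvMOD *
      probability_of_k_removed L kk j tight s) pvMOD
  else total

-- what index j contributes, in ZMod 1000000007
def pvTermZ (digit L : Int) (j : Int) : ZMod 1000000007 :=
  (digit : ZMod 1000000007) * 10 ^ (L - j).toNat * ((L.toNat.choose j.toNat : ZMod 1000000007) * 9 ^ (L - j).toNat)

theorem pv_step_cast (digit L kk : Int) (tight : Bool) (s : String) (total j : Int)
    (hL : 1 ≤ L) (hj : j ≤ L) :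
    ((pvStep digit L kk tight s total j : Int) : ZMod 1000000007) =
      (total : ZMod 1000000007) + pvTermZ digit L j := by
  unfold pvStep pvTermZ
  rw [pv_prob_eq L kk j tight s hL hj]
  split
  · rw [pv_cast_mod]; push_cast [pv_cast_mod, pv_cast_powMod]; ring
  · rename_i hnot
    have h0 : PySem.Int.mod ((L.toNat.choose j.toNat : Int) * PySem.Int.powMod 9 (L - j).toNat pvMOD) pvMOD = 0 := by
      have := PySem.Int.mod_nonneg ((L.toNat.choose j.toNat : Int) * PySem.Int.powMod 9 (L - j).toNat pvMOD) pvMOD_pos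
      omega
    have hz : ((L.toNat.choose j.toNat : ZMod 1000000007) * 9 ^ (L - j).toNat) = 0 := by
      have := pv_cast_mod ((L.toNat.choose j.toNat : Int) * PySem.Int.powMod 9 (L - j).toNat pvMOD)
      rw [h0] at this
      push_cast at this
      rw [pv_cast_powMod] at this
      push_cast at this
      rw [← this]
    rw [hz]; ring

-- the fold: bounds are kept and the cast accumulates pvTermZ over the visited indices
theorem pv_fold (digit L kk : Int) (tight : Bool) (s : String) (hL : 1 ≤ L) :
    ∀ (js : List Int) (total : Int), (∀ j ∈ js, j ≤ L) → 0 ≤ total → total < pvMOD →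
      (0 ≤ js.foldl (pvStep digit L kk tight s) total ∧
       js.foldl (pvStep digit L kk tight s) total < pvMOD) ∧
      ((js.foldl (pvStep digit L kk tight s) total : Int) : ZMod 1000000007) =
        (total : ZMod 1000000007) + (js.map (pvTermZ digit L)).sum := by
  intro js
  induction js with
  | nil => intro total _ h0 h1; exact ⟨⟨by simpa using h0, by simpa using h1⟩, by simp⟩
  | cons j js ih =>
    intro total hmem h0 h1
    have hj : j ≤ L := hmem j (by simp)
    have hb : 0 ≤ pvStep digit L kk tight s total j ∧ pvStep digit L kk tight s total j < pvMOD := by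
      unfold pvStep
      split
      · exact ⟨PySem.Int.mod_nonneg _ pvMOD_pos, PySem.Int.mod_lt _ pvMOD_pos⟩
      · exact ⟨h0, h1⟩
    have := ih (pvStep digit L kk tight s total j) (fun x hx => hmem x (by simp [hx])) hb.1 hb.2
    refine ⟨this.1, ?_⟩
    rw [List.foldl_cons] at *
    rw [this.2, pv_step_cast digit L kk tight s total j hL hj]
    simp [add_assoc]

-- the total contribution sum is digit * 91^m (binomial theorem)
theorem pv_sum_eq (digit : Int) (m : Nat) :
    (((PySem.List.pyRange 0 ((m : Int) + 1) 1).map (pvTermZ digit (m : Int))).sum) =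
      (digit : ZMod 1000000007) * 91 ^ m := by
  rw [PySem.List.pyRange_one]
  have hm : (((m : Int) + 1 - 0).toNat) = m + 1 := by omega
  rw [hm, List.map_map]
  have hlist : ∀ (n : Nat) (f : Nat → ZMod 1000000007),
      ((List.range n).map f).sum = ∑ i ∈ Finset.range n, f i := by
    intro n f
    induction n with
    | zero => simp
    | succ t ih => rw [List.range_succ, Finset.sum_range_succ, List.map_append]; simp [ih]
  rw [hlist]
  have hterm : ∀ i ∈ Finset.range (m + 1),
      (pvTermZ digit (m : Int) ∘ fun i : Nat => (0 : Int) + (i : Int)) i =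
        (digit : ZMod 1000000007) * ((1 : ZMod 1000000007) ^ i * 90 ^ (m - i) * (m.choose i : ZMod 1000000007)) := by
    intro i hi
    have him : i ≤ m := by simpa [Nat.lt_succ_iff] using hi
    have h1 : ((m : Int) - ((0 : Int) + (i : Int))).toNat = m - i := by omega
    have h2 : ((0 : Int) + (i : Int)).toNat = i := by omega
    have h3 : ((m : Int)).toNat = m := by omega
    simp only [Function.comp, pvTermZ, h1, h2, h3]
    have : (10 : ZMod 1000000007) ^ (m - i) * 9 ^ (m - i) = 90 ^ (m - i) := by
      rw [← mul_pow]; norm_num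
    ring_nf
    rw [← this]; ring
  rw [Finset.sum_congr rfl hterm, ← Finset.mul_sum, ← add_pow]
  norm_num

-- ===== VERDICT (by name: the statement is the Claim_ definition above) =====
theorem calc_contribution_spec : Claim_equal_calc_contribution := by
  intro digit pos n k tight n_str _
  unfold Spec_calc_contribution calc_contribution calc_contribution_alt
  set L : Int := n - pos - 1 with hLdef
  by_cases h0 : L = 0
  · simp [h0]
  · simp only [h0, if_false]
    by_cases hneg : L < 0
    · have hnil : PySem.List.pyRange 0 (L + 1) 1 = [] := PySem.List.pyRange_one_eq_nil (by omega)
      rw [hnil]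
      simp [hneg]
    · have hL : 1 ≤ L := by omega
      have hneg' : ¬ L < 0 := hneg
      simp only [hneg', if_false]
      set s : String := (if pos + 1 < n then PySem.Str.slice n_str (some (pos + 1)) none else "") with hs
      have hfoldshape : (PySem.List.pyRange 0 (L + 1) 1).foldl (fun total_contribution k_removed =>
          let prob := probability_of_k_removed L k k_removed tight s
          if prob > 0 then
            let final_pos := L - k_removed
            let digit_value := PySem.Int.mod (digit * PySem.Int.powMod 10 final_pos.toNat pvMOD) pvMOD
            PySem.Int.mod (total_contribution + digit_value * prob) pvMOD
          else total_contribution) 0 =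
          (PySem.List.pyRange 0 (L + 1) 1).foldl (pvStep digit L k tight s) 0 := rfl
      rw [hfoldshape]
      have hmem : ∀ j ∈ PySem.List.pyRange 0 (L + 1) 1, j ≤ L := by
        intro j hj
        have := (PySem.List.mem_pyRange_one).mp hj
        omega
      have hfold := pv_fold digit L k tight s hL (PySem.List.pyRange 0 (L + 1) 1) 0 hmem le_rfl pvMOD_pos
      set m : Nat := L.toNat with hm
      have hLm : L = (m : Int) := by omega
      apply pv_cast_inj hfold.1.1 hfold.1.2 (PySem.Int.mod_nonneg _ pvMOD_pos) (PySem.Int.mod_lt _ pvMOD_pos)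
      rw [hfold.2, pv_cast_mod, hLm, pv_sum_eq digit m]
      push_cast
      rw [pv_cast_powMod]
      push_cast
      ring
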